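-- pv_equiv track=rewrite | github.com/mohammadfaiizan/ProjectI | DSA/Problem/Trie/03_Autocomplete_Dictionary_Systems/720_Longest_Word_in_Dictionary.py | longestWord2
-- ===== SOURCE A (Python) =====
-- from typing import List, Set
-- from collections import defaultdict, deque
--
-- class TrieNode:
--     """Trie node for building word chains"""
--     def __init__(self):
--         self.children = {}
--         self.is_word = False
--         self.word = ""
--
-- def longestWord2(words: List[str]) -> str:
--     """
--     Approach 2: BFS Level-by-Level
--
--     Process words level by level using BFS.
--
--     Time: O(sum of word lengths)
--     Space: O(sum of word lengths)
--     """
--     # Build trie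
--     root = TrieNode()
--
--     for word in words:
--         node = root
--         for char in word:
--             if char not in node.children:
--                 node.children[char] = TrieNode()
--             node = node.children[char]
--         node.is_word = True
--         node.word = word
--
--     # BFS to find longest word
--     queue = deque([root])
--     longest_word = ""
--
--     while queue:
--         node = queue.popleft()
--
--         # Update longest word if current is longer or lexicographically smaller
--         if node.word and (len(node.word) > len(longest_word) or
--                          (len(node.word) == len(longest_word) and node.word < longest_word)):
--             longest_word = node.word
--
--         # Add children that are complete words
--         for child in node.children.values():
--             if child.is_word:
--                 queue.append(child)
--
--     return longest_word
-- ===== SOURCE B (Python) =====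
-- def longestWord2(words):
--     built = {""}
--     res = ""
--     for word in sorted(words):
--         if word[:-1] in built:
--             built.add(word)
--             if len(word) > len(res):
--                 res = word
--     return res
-- ===== Notes on version B (the rewrite author's own statement) =====
-- stated objective: simpler
-- what changed: Replaces the trie construction plus BFS level traversal with a single sort followed by one linear scan that grows a set of buildable words (a word is buildable when the word minus its last letter is already in the set), keeping the first strictly-longer buildable word.
import Mathlib
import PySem

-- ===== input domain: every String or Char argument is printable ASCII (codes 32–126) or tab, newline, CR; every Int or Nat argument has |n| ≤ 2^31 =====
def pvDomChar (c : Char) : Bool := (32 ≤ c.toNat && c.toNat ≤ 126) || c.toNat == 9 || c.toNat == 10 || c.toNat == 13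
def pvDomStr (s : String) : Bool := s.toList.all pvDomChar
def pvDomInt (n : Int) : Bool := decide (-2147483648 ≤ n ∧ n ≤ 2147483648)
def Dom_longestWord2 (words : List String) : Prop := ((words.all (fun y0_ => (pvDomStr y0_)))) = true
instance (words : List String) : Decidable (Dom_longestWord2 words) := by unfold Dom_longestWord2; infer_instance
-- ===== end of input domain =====

-- B replaces A's trie construction + BFS with a sort followed by one linear scan over a
-- growing set of buildable words (objective: simpler; return value proved identical).

-- ===== PORT A =====
-- A's TrieNode object graph, encoded as a mutual inductive (children = insertion-ordered
-- association list of (char, node), exactly Python's dict of children).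
mutual
inductive PTrie : Type
| mk : Bool → String → PChildren → PTrie
inductive PChildren : Type
| nil : PChildren
| cons : Char → PTrie → PChildren → PChildren
end

def isWord : PTrie → Bool | PTrie.mk b _ _ => b

-- `node.children[char]` lookup (first match; keys are unique by construction)
def findChild : PChildren → Char → Option PTrie
| PChildren.nil, _ => none
| PChildren.cons c t r, d => if c = d then some t else findChild r d

-- `node.children[char] = u`: overwrite in place, else append (Python dict insertion order)
def setChild : PChildren → Char → PTrie → PChildren
| PChildren.nil, d, u => PChildren.cons d u PChildren.nil
| PChildren.cons c t r, d, u =>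
    if c = d then PChildren.cons c u r else PChildren.cons c t (setChild r d u)

-- A's insertion loop: walk `word`, creating missing nodes, then set is_word/word at the end
def insertW : PTrie → List Char → String → PTrie
| PTrie.mk _ _ ch, [], full => PTrie.mk true full ch
| PTrie.mk b w ch, c :: cs, full =>
    let child := (findChild ch c).getD (PTrie.mk false "" PChildren.nil)
    PTrie.mk b w (setChild ch c (insertW child cs full))

-- `node.children.values()` in insertion order
def childList : PChildren → List PTrie
| PChildren.nil => []
| PChildren.cons _ t r => t :: childList r

-- A's update of `longest_word` by `node.word` (exactly the Python condition)
def aStep (l w : String) : String :=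
  if w ≠ "" ∧ (PySem.Str.len w > PySem.Str.len l ∨
               (PySem.Str.len w = PySem.Str.len l ∧ w < l)) then w else l

-- sizes, used only for the termination of the BFS loop
mutual
def tsize : PTrie → Nat | PTrie.mk _ _ ch => 1 + csize ch
def csize : PChildren → Nat | PChildren.nil => 0 | PChildren.cons _ t r => tsize t + csize r
end

def qsize (q : List PTrie) : Nat := (q.map tsize).sum

theorem qsize_append (q r : List PTrie) : qsize (q ++ r) = qsize q + qsize r := by
  simp [qsize]

theorem qsize_filter_le : (ch : PChildren) → (p : PTrie → Bool) →
    qsize ((childList ch).filter p) ≤ csize ch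
| PChildren.nil, p => by simp [childList, qsize, csize]
| PChildren.cons c t r, p => by
    have ih := qsize_filter_le r p
    simp only [childList, csize, List.filter]
    cases p t <;> simp only [qsize, List.map, List.sum_cons] at * <;> omega

-- A's BFS: pop left, fold the word into `longest_word`, enqueue children that are words
def bfs : List PTrie → String → String
| [], l => l
| PTrie.mk _ w ch :: rest, l =>
    bfs (rest ++ (childList ch).filter isWord) (aStep l w)
termination_by q _ => qsize q
decreasing_by
  have h1 := qsize_filter_le ch isWord
  have h2 := qsize_append rest ((childList ch).filter isWord)
  simp only [qsize, List.map, List.sum_cons, tsize] at *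
  omega

def longestWord2 (words : List String) : String :=
  let root := words.foldl (fun t w => insertW t w.toList w) (PTrie.mk false "" PChildren.nil)
  bfs [root] ""

-- ===== PORT B =====
-- one step of B's scan: state = (built set, best-so-far)
def bStep (st : PySem.Set String × String) (w : String) : PySem.Set String × String :=
  if PySem.Set.contains st.1 (PySem.Str.slice w none (some (-1))) then
    (PySem.Set.add st.1 w, if PySem.Str.len w > PySem.Str.len st.2 then w else st.2)
  else st

def longestWord2_alt (words : List String) : String :=
  ((PySem.List.sorted words (fun x => x) false).foldl bStep
    (PySem.Set.add PySem.Set.empty "", "")).2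

-- ===== PRECONDITION & SPEC =====
def Spec_longestWord2 (words : List String) (out : String) : Prop := out = longestWord2_alt words
instance (words : List String) (out : String) : Decidable (Spec_longestWord2 words out) := by unfold Spec_longestWord2; infer_instance

-- ===== CLAIM (what is proved, stated in full; the proofs are below) =====
def Claim_equal_longestWord2 : Prop := ∀ (words : List String), Dom_longestWord2 words → Spec_longestWord2 words (longestWord2 words)

-- ===== LEMMAS AND PROOFS =====

def wordOf : PTrie → String | PTrie.mk _ w _ => w

def beats (z l : String) : Prop :=
  z ≠ "" ∧ (PySem.Str.len z > PySem.Str.len l ∨ (PySem.Str.len z = PySem.Str.len l ∧ z < l))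

theorem aStep_spec (l w : String) : (beats w l ∧ aStep l w = w) ∨ (¬ beats w l ∧ aStep l w = l) := by
  unfold aStep beats
  split
  · left; constructor; assumption; rfl
  · right; constructor; assumption; rfl

theorem len_pos_of_ne (z : String) (h : z ≠ "") : 0 < PySem.Str.len z := by
  simp only [PySem.Str.len]
  have hnil : z.toList ≠ [] := by
    intro h2
    have h3 := congrArg String.ofList h2
    rw [String.ofList_toList] at h3
    exact h (by simpa using h3)
  cases hl : z.toList with
  | nil => exact absurd hl hnil
  | cons a as => simp

theorem beats_irrefl (z : String) : ¬ beats z z := by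
  rintro ⟨h1, h2 | ⟨h2, h3⟩⟩; omega; exact lt_irrefl _ h3

theorem beats_asymm (z l : String) (h : beats z l) : ¬ beats l z := by
  rintro ⟨h1, h2 | ⟨h2, h3⟩⟩ <;> rcases h with ⟨g1, g2 | ⟨g2, g3⟩⟩
  · omega
  · omega
  · omega
  · exact lt_asymm h3 g3

theorem beats_total (z l : String) (h : z ≠ l) : beats z l ∨ beats l z := by
  by_cases hz : z = ""
  · subst hz
    have hl : l ≠ "" := fun he => h he.symm
    right; exact ⟨hl, Or.inl (len_pos_of_ne l hl)⟩
  by_cases hl : l = ""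
  · subst hl
    left; exact ⟨hz, Or.inl (len_pos_of_ne z hz)⟩
  rcases lt_trichotomy (PySem.Str.len z) (PySem.Str.len l) with hlt | heq | hgt
  · right; exact ⟨hl, Or.inl hlt⟩
  · rcases lt_trichotomy z l with s | s | s
    · left; exact ⟨hz, Or.inr ⟨heq, s⟩⟩
    · exact absurd s h
    · right; exact ⟨hl, Or.inr ⟨heq.symm, s⟩⟩
  · left; exact ⟨hz, Or.inl hgt⟩

theorem beats_cut (z m r : String) (h1 : ¬ beats z m) (h2 : ¬ beats m r) (h3 : beats z r) : False := by
  obtain ⟨hz, hc⟩ := h3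
  by_cases hm : m = ""
  · subst hm
    exact h1 ⟨hz, Or.inl (len_pos_of_ne z hz)⟩
  have h1' : ¬ (PySem.Str.len z > PySem.Str.len m ∨ (PySem.Str.len z = PySem.Str.len m ∧ z < m)) :=
    fun hc' => h1 ⟨hz, hc'⟩
  have h2' : ¬ (PySem.Str.len m > PySem.Str.len r ∨ (PySem.Str.len m = PySem.Str.len r ∧ m < r)) :=
    fun hc' => h2 ⟨hm, hc'⟩
  rcases not_or.mp h1' with ⟨n1, n2⟩
  rcases not_or.mp h2' with ⟨n3, n4⟩
  rcases hc with hgt | ⟨heq, hlex⟩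
  · omega
  · have e1 : PySem.Str.len z = PySem.Str.len m := by omega
    have e2 : PySem.Str.len m = PySem.Str.len r := by omega
    have mz : ¬ z < m := fun s => n2 ⟨e1, s⟩
    have rm : ¬ m < r := fun s => n4 ⟨e2, s⟩
    have : r ≤ z := le_trans (le_of_not_gt rm) (le_of_not_gt mz)
    exact absurd (lt_of_lt_of_le hlex this) (lt_irrefl z)

def isBest (xs : List String) (y : String) : Prop := y ∈ xs ∧ ∀ z ∈ xs, ¬ beats z y

theorem isBest_unique (xs : List String) (a b : String)
    (ha : isBest xs a) (hb : isBest xs b) : a = b := by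
  by_contra hne
  rcases beats_total a b hne with h | h
  · exact hb.2 a ha.1 h
  · exact ha.2 b hb.1 h

theorem isBest_congr (xs ys : List String) (h : ∀ x, x ∈ xs ↔ x ∈ ys) (a : String)
    (ha : isBest xs a) : isBest ys a :=
  ⟨(h a).mp ha.1, fun z hz => ha.2 z ((h z).mpr hz)⟩

theorem foldl_aStep_isBest : ∀ (xs : List String) (l : String), isBest (l :: xs) (xs.foldl aStep l)
| [], l => ⟨List.mem_singleton.mpr rfl, by
    intro z hz; rw [List.mem_singleton] at hz; subst hz; exact beats_irrefl _⟩
| x :: xs, l => by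
    have ih := foldl_aStep_isBest xs (aStep l x)
    have hstep := aStep_spec l x
    have hmem : ∀ u, u ∈ aStep l x :: xs → u ∈ l :: x :: xs := by
      intro u hu
      rcases List.mem_cons.mp hu with h | h
      · rcases hstep with ⟨_, he⟩ | ⟨_, he⟩ <;> rw [he] at h <;> simp [h]
      · simp [h]
    have hnb : ¬ beats l (aStep l x) ∧ ¬ beats x (aStep l x) := by
      rcases hstep with ⟨hb, he⟩ | ⟨hb, he⟩ <;> rw [he]
      · exact ⟨beats_asymm _ _ hb, beats_irrefl _⟩
      · exact ⟨beats_irrefl _, hb⟩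
    constructor
    · exact hmem _ (by simpa using ih.1)
    · intro u hu
      have hmid : ¬ beats (aStep l x) (List.foldl aStep (aStep l x) xs) := ih.2 _ (by simp)
      have hgoal : List.foldl aStep l (x :: xs) = List.foldl aStep (aStep l x) xs := rfl
      rw [hgoal]
      rcases List.mem_cons.mp hu with h | h
      · subst h; exact fun hb => beats_cut _ _ _ hnb.1 hmid hb
      rcases List.mem_cons.mp h with h' | h'
      · subst h'; exact fun hb => beats_cut _ _ _ hnb.2 hmid hb
      · exact ih.2 u (by simp [h'])

theorem aStep_rcomm (l a b : String) : aStep (aStep l a) b = aStep (aStep l b) a := by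
  have h1 : isBest (l :: [a, b]) (aStep (aStep l a) b) := by
    simpa [List.foldl] using foldl_aStep_isBest [a, b] l
  have h2 : isBest (l :: [b, a]) (aStep (aStep l b) a) := by
    simpa [List.foldl] using foldl_aStep_isBest [b, a] l
  refine isBest_unique (l :: [a, b]) _ _ h1 (isBest_congr _ _ ?_ _ h2)
  intro x; constructor <;> (intro h; simp at h ⊢; tauto)

def root0 : PTrie := PTrie.mk false "" PChildren.nil

def nodeAt : PTrie → List Char → Option PTrie
| t, [] => some t
| PTrie.mk _ _ ch, c :: p =>
    match findChild ch c with
    | none => none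
    | some u => nodeAt u p
termination_by _ p => p.length

def labAt (t : PTrie) (p : List Char) : Option (Bool × String) :=
  (nodeAt t p).map (fun u => (isWord u, wordOf u))

theorem nodeAt_nil (t : PTrie) : nodeAt t [] = some t := by cases t <;> simp [nodeAt]

theorem nodeAt_cons (b : Bool) (w : String) (ch : PChildren) (c : Char) (p : List Char) :
    nodeAt (PTrie.mk b w ch) (c :: p) =
      match findChild ch c with
      | none => none
      | some u => nodeAt u p := by
  simp [nodeAt]

theorem findChild_setChild : ∀ (ch : PChildren) (c : Char) (u : PTrie) (d : Char),
    findChild (setChild ch c u) d = if c = d then some u else findChild ch d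
| PChildren.nil, c, u, d => by
    simp only [setChild, findChild]
| PChildren.cons c' t r, c, u, d => by
    by_cases h : c' = c
    · subst h
      simp only [setChild, if_pos rfl, findChild]
      by_cases h2 : c' = d <;> simp [h2, findChild]
    · simp only [setChild, if_neg h, findChild]
      by_cases h2 : c' = d
      · subst h2
        have : ¬ c = c' := fun he => h he.symm
        simp [this]
      · simp [h2, findChild_setChild r c u d]

theorem labAt_insert : ∀ (cs : List Char) (t : PTrie) (full : String) (p : List Char),
    labAt (insertW t cs full) p =
      if p = cs then some (true, full)
      else if p <+: cs then some ((labAt t p).getD (false, ""))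
      else labAt t p := by
  intro cs
  induction cs with
  | nil =>
      intro t full p
      cases t with
      | mk b w ch =>
        cases p with
        | nil => simp [insertW, labAt, nodeAt_nil, isWord, wordOf]
        | cons c p' =>
            have hnp : ¬ (c :: p' <+: ([] : List Char)) := by simp
            simp only [insertW, labAt, nodeAt_cons, if_neg (by simp : ¬ (c :: p' = ([] : List Char))), if_neg hnp]
  | cons c cs' ih =>
      intro t full p
      cases t with
      | mk b w ch =>
        show labAt (PTrie.mk b w (setChild ch c (insertW ((findChild ch c).getD root0) cs' full))) p = _
        cases p with
        | nil =>
            have h1 : ¬ (([] : List Char) = c :: cs') := by simp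
            have h2 : ([] : List Char) <+: c :: cs' := List.nil_prefix
            simp [labAt, nodeAt_nil, isWord, wordOf, h1, h2]
        | cons d p' =>
            by_cases hdc : d = c
            · subst hdc
              have hfc : findChild (setChild ch d (insertW ((findChild ch d).getD root0) cs' full)) d
                  = some (insertW ((findChild ch d).getD root0) cs' full) := by
                rw [findChild_setChild]; simp
              have hl : labAt (PTrie.mk b w (setChild ch d (insertW ((findChild ch d).getD root0) cs' full))) (d :: p')
                  = labAt (insertW ((findChild ch d).getD root0) cs' full) p' := by
                simp [labAt, nodeAt_cons, hfc]
              rw [hl, ih]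
              have heq : (d :: p' = d :: cs') ↔ (p' = cs') := by simp
              have hpre : (d :: p' <+: d :: cs') ↔ (p' <+: cs') := by
                constructor
                · intro h; exact (List.cons_prefix_cons.mp h).2
                · intro h; exact List.cons_prefix_cons.mpr ⟨rfl, h⟩
              cases hfound : findChild ch d with
              | some u =>
                  have hlab : labAt (PTrie.mk b w ch) (d :: p') = labAt u p' := by
                    simp [labAt, nodeAt_cons, hfound]
                  simp only [Option.getD_some]
                  by_cases h1 : p' = cs'
                  · simp [h1, heq, hlab]
                  · by_cases h2 : p' <+: cs'
                    · simp [h1, h2, heq, hpre, hlab, if_neg (fun hc => h1 (by simpa using hc))]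
                    · simp [h1, h2, heq, hpre, hlab,
                        if_neg (fun hc => h1 (by simpa using hc)),
                        if_neg (fun hc => h2 (hpre.mp hc))]
              | none =>
                  have hlab : labAt (PTrie.mk b w ch) (d :: p') = none := by
                    simp [labAt, nodeAt_cons, hfound]
                  simp only [Option.getD_none]
                  by_cases h1 : p' = cs'
                  · simp [h1, heq, hlab]
                  · by_cases h2 : p' <+: cs'
                    · -- created fresh chain: labAt root0 p' is (false,"") for p' = [], none otherwise
                      have hfresh : (labAt root0 p').getD (false, "") = (false, "") := by
                        cases p' with
                        | nil => simp [labAt, root0, nodeAt_nil, isWord, wordOf]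
                        | cons e q => simp [labAt, root0, nodeAt_cons, findChild]
                      rw [hfresh]
                      simp [h1, h2, heq, hpre, hlab]
                    · have hp'nil : p' ≠ [] := fun he => h2 (he ▸ List.nil_prefix)
                      have hfresh : labAt root0 p' = none := by
                        cases p' with
                        | nil => exact absurd rfl hp'nil
                        | cons e q => simp [labAt, root0, nodeAt_cons, findChild]
                      rw [hfresh]
                      simp [heq, hpre, h1, h2, hlab,
                        if_neg (fun hc => h1 (by simpa using hc)),
                        if_neg (fun hc => h2 (hpre.mp hc))]
            · -- different first char: untouched subtree
              have hne : ¬ c = d := fun he => hdc he.symm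
              have hfc : findChild (setChild ch c (insertW ((findChild ch c).getD root0) cs' full)) d
                  = findChild ch d := by
                rw [findChild_setChild]; simp [hne]
              have h1 : ¬ (d :: p' = c :: cs') := by intro h; exact hdc (by injection h)
              have h2 : ¬ (d :: p' <+: c :: cs') := by
                intro h; exact hdc (List.cons_prefix_cons.mp h).1
              simp [labAt, nodeAt_cons, hfc, h1, h2]

def buildT (words : List String) : PTrie :=
  words.foldl (fun t w => insertW t w.toList w) root0

theorem ofList_eq_iff (p : List Char) (w : String) : String.ofList p = w ↔ p = w.toList := by
  constructor
  · intro h; rw [← h, String.toList_ofList]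
  · intro h; rw [h, String.ofList_toList]

theorem labAt_build (words : List String) (p : List Char) :
    labAt (buildT words) p =
      if p = [] ∨ ∃ w ∈ words, p <+: w.toList
      then some (decide (String.ofList p ∈ words), if String.ofList p ∈ words then String.ofList p else "")
      else none := by
  induction words using List.reverseRecOn with
  | nil =>
      cases p with
      | nil => simp [buildT, labAt, root0, nodeAt_nil, isWord, wordOf]
      | cons c q => simp [buildT, labAt, root0, nodeAt_cons, findChild]
  | append_singleton ws w ih =>
      have hstep : buildT (ws ++ [w]) = insertW (buildT ws) w.toList w := by
        simp [buildT, List.foldl_append]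
      rw [hstep, labAt_insert, ih]
      by_cases h1 : p = w.toList
      · subst h1
        have hm : String.ofList w.toList ∈ ws ++ [w] := by
          simp [String.ofList_toList]
        have hcond : w.toList = [] ∨ ∃ w' ∈ ws ++ [w], w.toList <+: w'.toList :=
          Or.inr ⟨w, by simp, List.prefix_refl _⟩
        rw [if_pos rfl, if_pos hcond]
        simp [hm, String.ofList_toList]
      · by_cases h2 : p <+: w.toList
        · have hcond : p = [] ∨ ∃ w' ∈ ws ++ [w], p <+: w'.toList := by
            right; exact ⟨w, by simp, h2⟩
          rw [if_neg h1, if_pos h2, if_pos hcond]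
          have hnw : String.ofList p ≠ w := fun he => h1 ((ofList_eq_iff p w).mp he)
          have hmem : (String.ofList p ∈ ws ++ [w]) ↔ (String.ofList p ∈ ws) := by
            simp [hnw]
          by_cases hold : p = [] ∨ ∃ w' ∈ ws, p <+: w'.toList
          · rw [if_pos hold]
            simp only [Option.getD_some]
            simp [hmem]
          · rw [if_neg hold]
            simp only [Option.getD_none]
            have hnm : String.ofList p ∉ ws := by
              intro hc
              exact hold (Or.inr ⟨String.ofList p, hc, by rw [String.toList_ofList]⟩)
            simp [hmem, hnm]
        · rw [if_neg h1, if_neg h2]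
          have hcond : (p = [] ∨ ∃ w' ∈ ws ++ [w], p <+: w'.toList) ↔ (p = [] ∨ ∃ w' ∈ ws, p <+: w'.toList) := by
            constructor
            · rintro (h | ⟨w', hw', hp⟩)
              · exact Or.inl h
              · rcases List.mem_append.mp hw' with h' | h'
                · exact Or.inr ⟨w', h', hp⟩
                · rw [List.mem_singleton] at h'; subst h'; exact absurd hp h2
            · rintro (h | ⟨w', hw', hp⟩)
              · exact Or.inl h
              · exact Or.inr ⟨w', by simp [hw'], hp⟩
          have hmem : (String.ofList p ∈ ws ++ [w]) ↔ (String.ofList p ∈ ws) := by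
            have hnw : String.ofList p ≠ w := by
              intro he
              exact h2 (((ofList_eq_iff p w).mp he) ▸ List.prefix_refl _)
            simp [hnw]
          by_cases hold : p = [] ∨ ∃ w' ∈ ws, p <+: w'.toList
          · rw [if_pos hold, if_pos (hcond.mpr hold)]
            simp [hmem]
          · rw [if_neg hold, if_neg (fun hc => hold (hcond.mp hc))]

mutual
def wfT : PTrie → Prop
| PTrie.mk _ _ ch => wfC ch
def wfC : PChildren → Prop
| PChildren.nil => True
| PChildren.cons c t r => findChild r c = none ∧ wfT t ∧ wfC r
end

theorem wfT_of_findChild : ∀ (ch : PChildren) (c : Char) (u : PTrie),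
    wfC ch → findChild ch c = some u → wfT u
| PChildren.nil, c, u, _, h => by simp [findChild] at h
| PChildren.cons c' t r, c, u, hwf, h => by
    rw [findChild] at h
    split at h
    · cases h; exact (wfC.eq_def (PChildren.cons c' t r) ▸ hwf).2.1
    · exact wfT_of_findChild r c u (wfC.eq_def (PChildren.cons c' t r) ▸ hwf).2.2 h

theorem mem_childList_of_findChild : ∀ (ch : PChildren) (c : Char) (u : PTrie),
    findChild ch c = some u → u ∈ childList ch
| PChildren.nil, c, u, h => by simp [findChild] at h
| PChildren.cons c' t r, c, u, h => by
    rw [findChild] at h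
    rw [childList]
    split at h
    · cases h; exact List.mem_cons_self
    · exact List.mem_cons_of_mem _ (mem_childList_of_findChild r c u h)

theorem findChild_of_mem_childList : ∀ (ch : PChildren) (u : PTrie),
    wfC ch → u ∈ childList ch → ∃ c, findChild ch c = some u
| PChildren.nil, u, _, h => by simp [childList] at h
| PChildren.cons c' t r, u, hwf, h => by
    rw [childList] at h
    rcases List.mem_cons.mp h with rfl | h'
    · exact ⟨c', by simp [findChild]⟩
    · obtain ⟨c, hc⟩ := findChild_of_mem_childList r u (wfC.eq_def (PChildren.cons c' t r) ▸ hwf).2.2 h'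
      refine ⟨c, ?_⟩
      have hne : c' ≠ c := by
        intro he
        have := (wfC.eq_def (PChildren.cons c' t r) ▸ hwf).1
        rw [he] at this; rw [this] at hc; simp at hc
      simp [findChild, hne, hc]

theorem wfC_setChild : ∀ (ch : PChildren) (c : Char) (u : PTrie),
    wfC ch → wfT u → wfC (setChild ch c u)
| PChildren.nil, c, u, _, hu => by
    rw [setChild]
    rw [wfC.eq_def]
    exact ⟨rfl, hu, trivial⟩
| PChildren.cons c' t r, c, u, hwf, hu => by
    have h3 := wfC.eq_def (PChildren.cons c' t r) ▸ hwf
    rw [setChild]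
    by_cases h : c' = c
    · rw [if_pos h]
      rw [wfC.eq_def]
      exact ⟨h3.1, hu, h3.2.2⟩
    · rw [if_neg h]
      rw [wfC.eq_def]
      refine ⟨?_, h3.2.1, wfC_setChild r c u h3.2.2 hu⟩
      rw [findChild_setChild]
      rw [if_neg (fun he => h he.symm)]
      exact h3.1

theorem wfT_insertW : ∀ (cs : List Char) (t : PTrie) (full : String),
    wfT t → wfT (insertW t cs full) := by
  intro cs
  induction cs with
  | nil => intro t full h; cases t; rw [insertW]; exact h
  | cons c cs' ih =>
      intro t full h
      cases t with
      | mk b w ch =>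
        rw [insertW]
        have hch : wfC ch := h
        show wfC (setChild ch c (insertW ((findChild ch c).getD root0) cs' full))
        apply wfC_setChild _ _ _ hch
        apply ih
        cases hf : findChild ch c with
        | none => simp [root0]; rw [wfT.eq_def]; trivial
        | some u => simpa using wfT_of_findChild ch c u hch hf

theorem wfT_buildT (words : List String) : wfT (buildT words) := by
  have : ∀ (l : List String) (acc : PTrie), wfT acc → wfT (l.foldl (fun t w => insertW t w.toList w) acc) := by
    intro l
    induction l with
    | nil => intro acc h; exact h
    | cons w l ih => intro acc h; exact ih _ (wfT_insertW _ _ _ h)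
  exact this words root0 (by rw [root0, wfT.eq_def]; trivial)

-- words reachable by A's BFS from a node, assuming the node itself is visited
mutual
def reachT : PTrie → List String
| PTrie.mk _ w ch => (if w = "" then [] else [w]) ++ reachC ch
def reachC : PChildren → List String
| PChildren.nil => []
| PChildren.cons _ t r => (if isWord t then reachT t else []) ++ reachC r
end

theorem reachC_eq : ∀ ch : PChildren,
    reachC ch = ((childList ch).filter isWord).flatMap reachT
| PChildren.nil => by simp [reachC, childList]
| PChildren.cons c t r => by
    rw [reachC, childList, reachC_eq r]
    cases h : isWord t <;> simp [List.filter, h]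

theorem mem_reachC_iff : ∀ (ch : PChildren) (x : String),
    x ∈ reachC ch ↔ ∃ t ∈ childList ch, isWord t = true ∧ x ∈ reachT t
| PChildren.nil, x => by simp [reachC, childList]
| PChildren.cons c t r, x => by
    rw [reachC, childList]
    rw [List.mem_append]
    rw [mem_reachC_iff r x]
    cases h : isWord t with
    | false =>
        rw [show (if (false : Bool) = true then reachT t else []) = [] from rfl]
        simp only [List.not_mem_nil, false_or, List.mem_cons]
        constructor
        · rintro ⟨t', h1, h2, h3⟩; exact ⟨t', Or.inr h1, h2, h3⟩
        · rintro ⟨t', h1 | h1, h2, h3⟩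
          · subst h1; rw [h] at h2; exact Bool.noConfusion h2
          · exact ⟨t', h1, h2, h3⟩
    | true =>
        rw [show (if (true : Bool) = true then reachT t else []) = reachT t from rfl]
        simp only [List.mem_cons]
        constructor
        · rintro (h1 | ⟨t', h1, h2, h3⟩)
          · exact ⟨t, Or.inl rfl, h, h1⟩
          · exact ⟨t', Or.inr h1, h2, h3⟩
        · rintro ⟨t', h1 | h1, h2, h3⟩
          · subst h1; exact Or.inl h3
          · exact Or.inr ⟨t', h1, h2, h3⟩

theorem tsize_le_of_mem_childList : ∀ (ch : PChildren) (u : PTrie),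
    u ∈ childList ch → tsize u ≤ csize ch
| PChildren.nil, u, h => by simp [childList] at h
| PChildren.cons c t r, u, h => by
    rw [childList] at h
    rw [csize]
    rcases List.mem_cons.mp h with rfl | h'
    · omega
    · have := tsize_le_of_mem_childList r u h'
      omega

def okChain : List Char → PTrie → Prop
| [], _ => True
| c :: p, PTrie.mk _ _ ch =>
    match findChild ch c with
    | none => False
    | some u => isWord u = true ∧ okChain p u

theorem okChain_cons_iff (c : Char) (p : List Char) (b : Bool) (w : String) (ch : PChildren) :
    okChain (c :: p) (PTrie.mk b w ch) ↔
      ∃ u, findChild ch c = some u ∧ isWord u = true ∧ okChain p u := by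
  rw [okChain]
  cases h : findChild ch c with
  | none => simp
  | some u => simp

theorem nodeAt_cons_eq (b : Bool) (w : String) (ch : PChildren) (c : Char) (p : List Char)
    (u : PTrie) (h : findChild ch c = some u) :
    nodeAt (PTrie.mk b w ch) (c :: p) = nodeAt u p := by
  rw [nodeAt_cons, h]

theorem mem_reachT_iff (t : PTrie) (hwf : wfT t) (x : String) :
    x ∈ reachT t ↔ ∃ p u, okChain p t ∧ nodeAt t p = some u ∧ wordOf u = x ∧ x ≠ "" := by
  cases t with
  | mk b w ch =>
    have hch : wfC ch := hwf
    rw [reachT, List.mem_append]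
    constructor
    · rintro (h1 | h1)
      · refine ⟨[], PTrie.mk b w ch, trivial, nodeAt_nil _, ?_, ?_⟩
        · by_cases hw : w = "" <;> simp [hw, wordOf] at h1 ⊢; exact h1.symm
        · by_cases hw : w = "" <;> simp [hw] at h1 ⊢; intro he; rw [he] at h1; exact hw h1.symm
      · obtain ⟨t', hmem, hword, hx⟩ := (mem_reachC_iff ch x).mp h1
        obtain ⟨c, hc⟩ := findChild_of_mem_childList ch t' hch hmem
        have hwf' : wfT t' := wfT_of_findChild ch c t' hch hc
        have hlt : tsize t' < tsize (PTrie.mk b w ch) := by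
          have := tsize_le_of_mem_childList ch t' hmem
          rw [tsize]; omega
        obtain ⟨p', u, h2, h3, h4, h5⟩ := (mem_reachT_iff t' hwf' x).mp hx
        exact ⟨c :: p', u, (okChain_cons_iff _ _ _ _ _).mpr ⟨t', hc, hword, h2⟩,
          (nodeAt_cons_eq _ _ _ _ _ _ hc).trans h3, h4, h5⟩
    · rintro ⟨p, u, h1, h2, h3, h4⟩
      cases p with
      | nil =>
          rw [nodeAt_nil] at h2
          cases h2
          left
          have hw : w ≠ "" := by rw [wordOf] at h3; rw [← h3] at h4; exact h4
          simp [hw, ← h3, wordOf]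
      | cons c p' =>
          obtain ⟨t', hc, hword, hch'⟩ := (okChain_cons_iff _ _ _ _ _).mp h1
          have hwf' : wfT t' := wfT_of_findChild ch c t' hch hc
          have hlt : tsize t' < tsize (PTrie.mk b w ch) := by
            have := tsize_le_of_mem_childList ch t' (mem_childList_of_findChild ch c t' hc)
            rw [tsize]; omega
          right
          apply (mem_reachC_iff ch x).mpr
          refine ⟨t', mem_childList_of_findChild ch c t' hc, hword, ?_⟩
          apply (mem_reachT_iff t' hwf' x).mpr
          exact ⟨p', u, hch', (nodeAt_cons_eq _ _ _ _ _ _ hc).symm.trans h2, h3, h4⟩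
termination_by tsize t

theorem chain_isWord : ∀ (q : List Char) (p : List Char) (t : PTrie), okChain p t → q <+: p → q ≠ [] →
    ∃ v, nodeAt t q = some v ∧ isWord v = true
| [], p, t, _, _, hne => absurd rfl hne
| c :: q', p, t, hch, hpre, _ => by
    cases p with
    | nil => exact absurd (List.prefix_nil.mp hpre) (by simp)
    | cons c0 p' =>
        obtain ⟨hc0, hq⟩ := List.cons_prefix_cons.mp hpre
        subst hc0
        cases t with
        | mk b w ch =>
          obtain ⟨u, hfc, hw, hch'⟩ := (okChain_cons_iff _ _ _ _ _).mp hch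
          by_cases hq0 : q' = []
          · subst hq0
            refine ⟨u, ?_, hw⟩
            rw [nodeAt_cons_eq _ _ _ _ _ _ hfc, nodeAt_nil]
          · obtain ⟨v, hv1, hv2⟩ := chain_isWord q' p' u hch' hq hq0
            exact ⟨v, (nodeAt_cons_eq _ _ _ _ _ _ hfc).trans hv1, hv2⟩

theorem chain_of_isWord : ∀ (p : List Char) (t : PTrie),
    (∀ q, q <+: p → q ≠ [] → ∃ v, nodeAt t q = some v ∧ isWord v = true) → okChain p t
| [], t, _ => by rw [okChain]; trivial
| c :: p', t, h => by
    cases t with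
    | mk b w ch =>
      obtain ⟨v, hv1, hv2⟩ := h [c] (by simp [List.cons_prefix_cons]) (by simp)
      have hfc : ∃ u, findChild ch c = some u ∧ u = v := by
        rw [nodeAt_cons] at hv1
        cases hf : findChild ch c with
        | none => rw [hf] at hv1; simp at hv1
        | some u =>
            rw [hf] at hv1
            have hv1' : some u = some v := by simpa [nodeAt_nil] using hv1
            exact ⟨u, rfl, by injection hv1'⟩
      obtain ⟨u, hu, rfl⟩ := hfc
      apply (okChain_cons_iff _ _ _ _ _).mpr
      refine ⟨u, hu, hv2, chain_of_isWord p' u ?_⟩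
      intro q hq hqne
      obtain ⟨v', hv1', hv2'⟩ := h (c :: q) (List.cons_prefix_cons.mpr ⟨rfl, hq⟩) (by simp)
      exact ⟨v', (nodeAt_cons_eq _ _ _ _ _ _ hu).symm.trans hv1', hv2'⟩

theorem aStep_empty (l : String) : aStep l "" = l := by
  rcases aStep_spec l "" with ⟨⟨h, _⟩, _⟩ | ⟨_, h⟩
  · exact absurd rfl h
  · exact h

theorem bfs_eq (q : List PTrie) (l : String) : bfs q l = (q.flatMap reachT).foldl aStep l := by
  induction q, l using bfs.induct with
  | case1 l => simp [bfs]
  | case2 b w ch rest l ih =>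
      rw [bfs, ih]
      have hrc : ((childList ch).filter isWord).flatMap reachT = reachC ch := (reachC_eq ch).symm
      rw [List.flatMap_append, hrc]
      rw [List.flatMap_cons, reachT]
      have hfold : ((if w = "" then [] else [w]) ++ (reachC ch ++ rest.flatMap reachT)).foldl aStep l
          = (reachC ch ++ rest.flatMap reachT).foldl aStep (aStep l w) := by
        by_cases hw : w = ""
        · subst hw; rw [if_pos rfl, List.nil_append, aStep_empty]
        · rw [if_neg hw, List.cons_append, List.foldl_cons, List.nil_append]
      rw [List.append_assoc, hfold]
      exact List.Perm.foldl_eq'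
        (List.perm_append_comm)
        (fun x _ y _ z => aStep_rcomm z x y) (aStep l w)

-- ===== A-side characterization =====

def AllPre (ws : List String) (x : String) : Prop :=
  ∀ q, q <+: x.toList → q ≠ [] → String.ofList q ∈ ws

theorem labAt_unpack (t : PTrie) (p : List Char) (bb : Bool) (ww : String)
    (h : labAt t p = some (bb, ww)) :
    ∃ u, nodeAt t p = some u ∧ isWord u = bb ∧ wordOf u = ww := by
  rw [labAt] at h
  cases hn : nodeAt t p with
  | none => rw [hn] at h; simp at h
  | some u =>
      rw [hn] at h
      simp at h
      exact ⟨u, rfl, h.1, h.2⟩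

theorem mem_reach_build_iff (ws : List String) (x : String) :
    x ∈ reachT (buildT ws) ↔ x ≠ "" ∧ x ∈ ws ∧ AllPre ws x := by
  rw [mem_reachT_iff _ (wfT_buildT ws)]
  constructor
  · rintro ⟨p, u, hc, hn, hw, hx⟩
    have hlab : labAt (buildT ws) p = some (isWord u, wordOf u) := by
      rw [labAt, hn]; rfl
    rw [labAt_build] at hlab
    by_cases hcond : p = [] ∨ ∃ w ∈ ws, p <+: w.toList
    case neg => rw [if_neg hcond] at hlab; exact absurd hlab (by simp)
    case pos =>
      rw [if_pos hcond] at hlab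
      have heq := Option.some.inj hlab
      have hw2 : wordOf u = if String.ofList p ∈ ws then String.ofList p else "" := by
        have h2 := congrArg Prod.snd heq
        simpa using h2.symm
      by_cases hm : String.ofList p ∈ ws
      · rw [if_pos hm] at hw2
        have hxp : x = String.ofList p := hw ▸ hw2
        have hptl : p = x.toList := by rw [hxp, String.toList_ofList]
        refine ⟨hx, hxp ▸ hm, ?_⟩
        intro q hq hqne
        obtain ⟨v, hv1, hv2⟩ := chain_isWord q p (buildT ws) hc (hptl ▸ hq) hqne
        have hlabq : labAt (buildT ws) q = some (isWord v, wordOf v) := by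
          rw [labAt, hv1]; rfl
        rw [labAt_build] at hlabq
        by_cases hcondq : q = [] ∨ ∃ w ∈ ws, q <+: w.toList
        case neg => rw [if_neg hcondq] at hlabq; exact absurd hlabq (by simp)
        case pos =>
          rw [if_pos hcondq] at hlabq
          have heq2 := Option.some.inj hlabq
          have hb : isWord v = decide (String.ofList q ∈ ws) := by
            have h2 := congrArg Prod.fst heq2
            simpa using h2.symm
          rw [hv2] at hb
          exact of_decide_eq_true hb.symm
      · rw [if_neg hm] at hw2
        exact absurd (hw ▸ hw2) hx
  · rintro ⟨hx, hm, hall⟩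
    have hcond : x.toList = [] ∨ ∃ w ∈ ws, x.toList <+: w.toList :=
      Or.inr ⟨x, hm, List.prefix_refl _⟩
    have hlab := labAt_build ws x.toList
    rw [if_pos hcond, String.ofList_toList, if_pos hm] at hlab
    obtain ⟨u, hn, hb, hw⟩ := labAt_unpack _ _ _ _ hlab
    refine ⟨x.toList, u, ?_, hn, hw, hx⟩
    apply chain_of_isWord
    intro q hq hqne
    have hcondq : q = [] ∨ ∃ w ∈ ws, q <+: w.toList := Or.inr ⟨x, hm, hq⟩
    have hlabq := labAt_build ws q
    rw [if_pos hcondq] at hlabq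
    have hmq : String.ofList q ∈ ws := hall q hq hqne
    rw [if_pos hmq] at hlabq
    obtain ⟨v, hnv, hbv, _⟩ := labAt_unpack _ _ _ _ hlabq
    exact ⟨v, hnv, by rw [hbv]; simp [hmq]⟩

theorem A_eq (words : List String) :
    longestWord2 words = (reachT (buildT words)).foldl aStep "" := by
  show bfs [buildT words] "" = _
  rw [bfs_eq]
  simp

-- ===== B-side =====

def buildableB (ws : List String) (l : List Char) : Bool :=
  l.inits.all (fun q => q.isEmpty || ws.contains (String.ofList q))

def goodB (ws : List String) (x : String) : Bool :=
  ws.contains x && buildableB ws x.toList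

theorem buildableB_iff (ws : List String) (l : List Char) :
    buildableB ws l = true ↔ ∀ q, q <+: l → q ≠ [] → String.ofList q ∈ ws := by
  rw [buildableB, List.all_eq_true]
  constructor
  · intro h q hq hqne
    have := h q ((List.mem_inits q l).mpr hq)
    rcases Bool.or_eq_true_iff.mp this with h' | h'
    · exact absurd (List.isEmpty_iff.mp h') hqne
    · exact List.contains_iff_mem.mp h'
  · intro h q hq
    by_cases hqe : q = []
    · subst hqe; simp
    · have := h q ((List.mem_inits q l).mp hq) hqe
      simp [this]

theorem goodB_iff (ws : List String) (x : String) :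
    goodB ws x = true ↔ x ∈ ws ∧ AllPre ws x := by
  rw [goodB, Bool.and_eq_true, List.contains_iff_mem, buildableB_iff]
  rfl

theorem prefix_length_lt (q l : List Char) (h : q <+: l) (hne : q ≠ l) : q.length < l.length := by
  rcases Nat.lt_or_ge q.length l.length with h' | h'
  · exact h'
  · exact absurd (List.IsPrefix.eq_of_length h (Nat.le_antisymm h.length_le h')) hne

theorem prefix_dropLast (q l : List Char) (h : q <+: l) (hne : q ≠ l) : q <+: l.dropLast := by
  have hlen : q.length < l.length := prefix_length_lt q l h hne
  have h1 : q = l.take q.length := List.prefix_iff_eq_take.mp h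
  have h2 : (l.dropLast).take q.length = q := by
    rw [List.dropLast_eq_take, List.take_take]
    rw [Nat.min_def]
    rw [if_pos (by omega)]
    exact h1.symm
  rw [← h2]
  exact List.take_prefix _ _

theorem lex_lt_of_proper_prefix : ∀ (q l : List Char), q <+: l → q ≠ l → q < l
| [], l, h, hne => by
    cases l with
    | nil => exact absurd rfl hne
    | cons c l' => exact List.Lex.nil
| c :: q', l, h, hne => by
    cases l with
    | nil => exact absurd (List.prefix_nil.mp h) (List.cons_ne_nil c q')
    | cons c0 l' =>
        obtain ⟨hc, hq⟩ := List.cons_prefix_cons.mp h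
        subst hc
        exact List.Lex.cons (lex_lt_of_proper_prefix q' l' hq (fun he => hne (by rw [he])))

theorem str_lt_of_proper_prefix (x y : String) (h : x.toList <+: y.toList) (hne : x ≠ y) : x < y := by
  rw [String.lt_iff_toList_lt]
  refine lex_lt_of_proper_prefix _ _ h (fun he => hne ?_)
  have h2 := congrArg String.ofList he
  rw [String.ofList_toList, String.ofList_toList] at h2
  exact h2

theorem len_zero_eq (z : String) (h : PySem.Str.len z = 0) : z = "" := by
  by_contra hne
  have := len_pos_of_ne z hne
  omega

theorem len_le_of_not_beats (z r : String) (h : ¬ beats z r) (hz : z ≠ "") :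
    PySem.Str.len z ≤ PySem.Str.len r := by
  by_contra hc
  exact h ⟨hz, Or.inl (by omega)⟩

theorem B_inv : ∀ (todo processed : List String) (built : PySem.Set String) (res : String)
    (ws : List String),
    processed ++ todo = PySem.List.sorted ws (fun x => x) false →
    (∀ x : String, PySem.Set.contains built x = true ↔ (x = "" ∨ (x ∈ processed ∧ goodB ws x = true))) →
    isBest ("" :: processed.filter (goodB ws)) res →
    isBest ("" :: (processed ++ todo).filter (goodB ws)) ((todo.foldl bStep (built, res)).2)
| [], processed, built, res, ws, hps, hbuilt, hres => by simpa using hres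
| w :: todo', processed, built, res, ws, hps, hbuilt, hres => by
    have hpair : (processed ++ w :: todo').Pairwise (· ≤ ·) := by
      rw [hps]; exact PySem.List.sorted_pairwise ws (fun x => x)
    have hwmem : w ∈ ws := by
      have h0 : w ∈ processed ++ w :: todo' := by simp
      rw [hps] at h0
      exact (PySem.List.mem_sorted ws _ false w).mp h0
    have hprocle : ∀ y ∈ processed, y ≤ w := by
      intro y hy
      exact (List.pairwise_append.mp hpair).2.2 y hy w (by simp)
    have hsmall : ∀ y, y ∈ ws → y < w → y ∈ processed := by
      intro y hyw hylt
      have h0 : y ∈ processed ++ w :: todo' := by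
        rw [hps]; exact (PySem.List.mem_sorted ws _ false y).mpr hyw
      rcases List.mem_append.mp h0 with h | h
      · exact h
      · rcases List.mem_cons.mp h with rfl | h'
        · exact absurd hylt (lt_irrefl _)
        · have hwy : w ≤ y :=
            (List.pairwise_cons.mp (List.pairwise_append.mp hpair).2.1).1 y h'
          exact absurd hylt (not_lt.mpr hwy)
    have hpretl : (PySem.Str.slice w none (some (-1))).toList = w.toList.dropLast :=
      PySem.Str.slice_to_neg_one w
    have hkey : (PySem.Set.contains built (PySem.Str.slice w none (some (-1))) = true) ↔ goodB ws w = true := by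
      rw [hbuilt _]
      constructor
      · rintro (hpe | ⟨hpp, hpg⟩)
        · apply (goodB_iff ws w).mpr
          refine ⟨hwmem, ?_⟩
          intro q hq hqne
          have hdl : w.toList.dropLast = [] := by
            rw [← hpretl, hpe]; rfl
          have hqeq : q = w.toList := by
            by_cases hqw : q = w.toList
            · exact hqw
            · have := prefix_dropLast q _ hq hqw
              rw [hdl] at this
              exact absurd (List.prefix_nil.mp this) hqne
          rw [hqeq, String.ofList_toList]; exact hwmem
        · apply (goodB_iff ws w).mpr
          have hg := (goodB_iff ws _).mp hpg
          refine ⟨hwmem, ?_⟩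
          intro q hq hqne
          by_cases hqw : q = w.toList
          · rw [hqw, String.ofList_toList]; exact hwmem
          · have hq' : q <+: (PySem.Str.slice w none (some (-1))).toList := by
              rw [hpretl]; exact prefix_dropLast q _ hq hqw
            exact hg.2 q hq' hqne
      · intro hgw'
        obtain ⟨hmemw, hall⟩ := (goodB_iff ws w).mp hgw'
        by_cases hdl : w.toList.dropLast = []
        · left
          apply String.toList_eq_nil_iff.mp
          rw [hpretl, hdl]
        · right
          have hpren : (PySem.Str.slice w none (some (-1))).toList ≠ [] := by
            rw [hpretl]; exact hdl
          have hprefix : (PySem.Str.slice w none (some (-1))).toList <+: w.toList := by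
            rw [hpretl]; exact List.dropLast_prefix _
          have hproper : (PySem.Str.slice w none (some (-1))).toList ≠ w.toList := by
            rw [hpretl]
            intro hc
            have hlen := congrArg List.length hc
            rw [List.length_dropLast] at hlen
            have hne : w.toList ≠ [] := by
              intro h0; rw [h0] at hdl; exact hdl rfl
            have hlp : w.toList.length ≠ 0 := fun h0 => hne (List.eq_nil_of_length_eq_zero h0)
            omega
          have hpmem : (PySem.Str.slice w none (some (-1))) ∈ ws := by
            have := hall _ hprefix hpren
            rwa [String.ofList_toList] at this
          have hplt : (PySem.Str.slice w none (some (-1))) < w :=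
            str_lt_of_proper_prefix _ w hprefix (fun he => hproper (by rw [he]))
          refine ⟨hsmall _ hpmem hplt, ?_⟩
          rw [goodB_iff]
          refine ⟨hpmem, ?_⟩
          intro q hq hqne
          exact hall q (hq.trans hprefix) hqne
    rw [List.foldl_cons]
    by_cases hc : PySem.Set.contains built (PySem.Str.slice w none (some (-1))) = true
    · have hgw : goodB ws w = true := hkey.mp hc
      have hstep : bStep (built, res) w =
          (PySem.Set.add built w, if PySem.Str.len w > PySem.Str.len res then w else res) := by
        rw [bStep, if_pos hc]
      have hps' : (processed ++ [w]) ++ todo' = PySem.List.sorted ws (fun x => x) false := by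
        rw [← hps]; simp
      have hbuilt' : ∀ x : String, PySem.Set.contains (PySem.Set.add built w) x = true ↔
          (x = "" ∨ (x ∈ processed ++ [w] ∧ goodB ws x = true)) := by
        intro x
        rw [PySem.Set.contains_iff, PySem.Set.mem_add, ← PySem.Set.contains_iff, hbuilt x]
        constructor
        · rintro ((h | ⟨h1, h2⟩) | h)
          · exact Or.inl h
          · exact Or.inr ⟨by simp [h1], h2⟩
          · exact Or.inr ⟨by simp [h], h ▸ hgw⟩
        · rintro (h | ⟨h1, h2⟩)
          · exact Or.inl (Or.inl h)
          · rcases List.mem_append.mp h1 with h' | h'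
            · exact Or.inl (Or.inr ⟨h', h2⟩)
            · exact Or.inr (List.mem_singleton.mp h')
      have hfl : (processed ++ [w]).filter (goodB ws) = processed.filter (goodB ws) ++ [w] := by
        rw [List.filter_append]
        simp [hgw]
      have hres' : isBest ("" :: (processed ++ [w]).filter (goodB ws))
          (if PySem.Str.len w > PySem.Str.len res then w else res) := by
        rw [hfl]
        by_cases hlen : PySem.Str.len w > PySem.Str.len res
        · rw [if_pos hlen]
          constructor
          · simp
          · intro z hz
            rcases List.mem_cons.mp hz with rfl | hz'
            · rintro ⟨hz1, _⟩; exact hz1 rfl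
            rcases List.mem_append.mp hz' with hz'' | hz''
            · intro hb
              obtain ⟨hb1, hb2⟩ := hb
              have hzres : ¬ beats z res := hres.2 z (by simp [hz''])
              have hle : PySem.Str.len z ≤ PySem.Str.len res := len_le_of_not_beats z res hzres hb1
              rcases hb2 with h' | ⟨h', _⟩ <;> omega
            · rw [List.mem_singleton.mp hz'']
              exact beats_irrefl w
        · rw [if_neg hlen]
          constructor
          · rcases List.mem_cons.mp hres.1 with h | h
            · simp [h]
            · simp [List.mem_append.mpr (Or.inl h)]
          · intro z hz
            rcases List.mem_cons.mp hz with rfl | hz'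
            · rintro ⟨hz1, _⟩; exact hz1 rfl
            rcases List.mem_append.mp hz' with hz'' | hz''
            · exact hres.2 z (by simp [hz''])
            · rw [List.mem_singleton.mp hz'']
              rintro ⟨hw1, hw2 | ⟨hw2, hw3⟩⟩
              · omega
              · rcases List.mem_cons.mp hres.1 with h | h
                · rw [h] at hw2
                  have : PySem.Str.len w = 0 := by
                    have := len_pos_of_ne w hw1
                    simp [PySem.Str.len] at hw2 ⊢
                    omega
                  exact hw1 (len_zero_eq w this)
                · have hrp : res ∈ processed := (List.mem_filter.mp h).1
                  exact absurd hw3 (not_lt.mpr (hprocle res hrp))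
      have hrec := B_inv todo' (processed ++ [w]) (PySem.Set.add built w)
        (if PySem.Str.len w > PySem.Str.len res then w else res) ws hps' hbuilt' hres'
      rw [hstep]
      have hl : (processed ++ [w]) ++ todo' = processed ++ w :: todo' := by simp
      rw [hl] at hrec
      exact hrec
    · have hgw : goodB ws w = false := by
        cases h2 : goodB ws w
        · rfl
        · exact absurd (hkey.mpr h2) hc
      have hstep : bStep (built, res) w = (built, res) := by
        rw [bStep, if_neg hc]
      have hps' : (processed ++ [w]) ++ todo' = PySem.List.sorted ws (fun x => x) false := by
        rw [← hps]; simp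
      have hbuilt' : ∀ x : String, PySem.Set.contains built x = true ↔
          (x = "" ∨ (x ∈ processed ++ [w] ∧ goodB ws x = true)) := by
        intro x
        rw [hbuilt x]
        constructor
        · rintro (h | ⟨h1, h2⟩)
          · exact Or.inl h
          · exact Or.inr ⟨by simp [h1], h2⟩
        · rintro (h | ⟨h1, h2⟩)
          · exact Or.inl h
          · rcases List.mem_append.mp h1 with h' | h'
            · exact Or.inr ⟨h', h2⟩
            · rw [List.mem_singleton.mp h'] at h2
              rw [hgw] at h2
              exact absurd h2 (by simp)
      have hres' : isBest ("" :: (processed ++ [w]).filter (goodB ws)) res := by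
        rw [List.filter_append]
        simp only [List.filter, hgw]
        simpa using hres
      have hrec := B_inv todo' (processed ++ [w]) built res ws hps' hbuilt' hres'
      rw [hstep]
      have hl : (processed ++ [w]) ++ todo' = processed ++ w :: todo' := by simp
      rw [hl] at hrec
      exact hrec

theorem B_isBest (words : List String) :
    isBest ("" :: (PySem.List.sorted words (fun x => x) false).filter (goodB words))
      (longestWord2_alt words) := by
  have h := B_inv (PySem.List.sorted words (fun x => x) false) [] (PySem.Set.add PySem.Set.empty "") "" words
    (by simp)
    (by
      intro x
      rw [PySem.Set.contains_iff, PySem.Set.mem_add]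
      simp [PySem.Set.empty])
    (by
      constructor
      · simp
      · intro z hz
        rw [List.filter_nil] at hz
        rw [List.mem_singleton.mp hz]
        exact beats_irrefl "")
  simpa using h

theorem main_eq (words : List String) : longestWord2 words = longestWord2_alt words := by
  have hA : isBest ("" :: reachT (buildT words)) (longestWord2 words) := by
    rw [A_eq]; exact foldl_aStep_isBest _ ""
  have hB := B_isBest words
  refine isBest_unique _ _ _ hA (isBest_congr _ _ ?_ _ hB)
  intro x
  rw [List.mem_cons, List.mem_cons, List.mem_filter, mem_reach_build_iff]
  constructor
  · rintro (h | h)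
    · exact Or.inl h
    · obtain ⟨h1, h2⟩ := h
      have hg := (goodB_iff words x).mp h2
      by_cases hx : x = ""
      · exact Or.inl hx
      · exact Or.inr ⟨hx, hg.1, hg.2⟩
  · rintro (h | ⟨h1, h2, h3⟩)
    · exact Or.inl h
    · exact Or.inr ⟨(PySem.List.mem_sorted _ _ _ _).mpr h2, (goodB_iff words x).mpr ⟨h2, h3⟩⟩

-- ===== VERDICT (by name: the statement is the Claim_ definition above) =====
theorem longestWord2_spec : Claim_equal_longestWord2 := by
  intro words _
  unfold Spec_longestWord2
  exact main_eq words
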